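-- pv_equiv track=rewrite | github.com/rohanprateek/pythonprograms | vowelsubstrings.py | solve
-- ===== SOURCE A (Python) =====
-- def solve(A):
--
--     vow = {'a', 'e', 'i', 'o', 'u', 'A', 'E', 'I', 'O', 'U'}
--     count = 0
--     n = len(A) - 1
--     for i in range(len(A)):
--
--         if A[i] in vow:
--             count += n - i + 1
--
--     return count
-- ===== SOURCE B (Python) =====
-- def solve(A):
--     total = 0
--     run = 0
--     for ch in A:
--         if ch in 'aeiouAEIOU':
--             run += 1
--         total += run
--     return total
-- ===== Notes on version B (the rewrite author's own statement) =====
-- stated objective: alternative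
-- what changed: Instead of adding the index-arithmetic term len(A)-1-i+1 at each vowel position, B keeps a running prefix count of vowels and adds it to the total at every character, using the identity sum over vowels of (len-i) = sum over positions of prefix vowel count.
import Mathlib
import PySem

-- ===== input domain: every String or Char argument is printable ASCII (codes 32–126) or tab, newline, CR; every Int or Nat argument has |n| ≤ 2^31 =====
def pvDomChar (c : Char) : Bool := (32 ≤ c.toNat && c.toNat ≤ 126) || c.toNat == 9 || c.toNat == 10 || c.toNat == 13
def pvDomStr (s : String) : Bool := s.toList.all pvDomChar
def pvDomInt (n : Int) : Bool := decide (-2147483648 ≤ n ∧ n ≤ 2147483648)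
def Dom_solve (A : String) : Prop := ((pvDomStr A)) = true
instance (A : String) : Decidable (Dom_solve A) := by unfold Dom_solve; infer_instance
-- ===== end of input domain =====

-- B replaces A's per-vowel index arithmetic (len-1-i+1) by a running prefix vowel count added at every
-- character (objective: alternative decomposition, same O(n) cost).

-- ===== PORT A =====
-- vow = {'a','e','i','o','u','A','E','I','O','U'}
def pvVowA : PySem.Set Char :=
  PySem.Set.ofList ['a', 'e', 'i', 'o', 'u', 'A', 'E', 'I', 'O', 'U']

def solve (A : String) : Int :=
  let s := A.toList
  let count : Int := 0
  let n : Int := (s.length : Int) - 1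
  -- for i in range(len(A)): if A[i] in vow: count += n - i + 1
  (PySem.List.enumerate s 0).foldl
    (fun count p => if p.2 ∈ pvVowA then count + (n - p.1 + 1) else count) count

-- ===== PORT B =====
def solve_alt (A : String) : Int :=
  -- total = 0; run = 0; for ch in A: if ch in 'aeiouAEIOU': run += 1; total += run
  (A.toList.foldl
    (fun (st : Int × Int) ch =>
      let run := if ch ∈ "aeiouAEIOU".toList then st.1 + 1 else st.1
      (run, st.2 + run))
    (0, 0)).2

-- ===== PRECONDITION & SPEC =====
def Spec_solve (A : String) (out : Int) : Prop := out = solve_alt A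
instance (A : String) (out : Int) : Decidable (Spec_solve A out) := by unfold Spec_solve; infer_instance

-- ===== CLAIM (what is proved, stated in full; the proofs are below) =====
def Claim_equal_solve : Prop := ∀ (A : String), Dom_solve A → Spec_solve A (solve A)

-- ===== LEMMAS AND PROOFS =====

-- Common value: each vowel contributes the length of the suffix starting at it.
def pvT (l : List Char) : Int :=
  match l with
  | [] => 0
  | ch :: l => (if ch ∈ "aeiouAEIOU".toList then ((l.length : Int) + 1) else 0) + pvT l

theorem pvVow_mem (c : Char) : (c ∈ pvVowA) = (c ∈ "aeiouAEIOU".toList) := by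
  simp [pvVowA, PySem.Set.ofList]

theorem lemA (n : Int) : ∀ (l : List Char) (i c : Int), n - i + 1 = (l.length : Int) →
    (PySem.List.enumerate l i).foldl
      (fun count p => if p.2 ∈ pvVowA then count + (n - p.1 + 1) else count) c
    = c + pvT l := by
  intro l
  induction l with
  | nil => intro i c h; simp [PySem.List.enumerate_nil, pvT]
  | cons ch l ih =>
    intro i c h
    rw [PySem.List.enumerate_cons, List.foldl_cons, ih (i + 1) _ (by simp only [List.length_cons] at h; push_cast at h ⊢; omega)]
    simp only [pvT, pvVow_mem]
    split <;> simp only [List.length_cons] at h ⊢ <;> push_cast at h ⊢ <;> omega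

theorem lemB : ∀ (l : List Char) (r t : Int),
    (l.foldl
      (fun (st : Int × Int) ch =>
        let run := if ch ∈ "aeiouAEIOU".toList then st.1 + 1 else st.1
        (run, st.2 + run))
      (r, t)).2
    = t + r * (l.length : Int) + pvT l := by
  intro l
  induction l with
  | nil => intro r t; simp [pvT]
  | cons ch l ih =>
    intro r t
    rw [List.foldl_cons]
    simp only []
    rw [ih]
    simp only [pvT]
    split <;> simp only [List.length_cons] <;> push_cast <;> ring

-- ===== VERDICT (by name: the statement is the Claim_ definition above) =====
theorem solve_spec : Claim_equal_solve := by
  intro A _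
  unfold Spec_solve solve solve_alt
  rw [lemA ((A.toList.length : Int) - 1) A.toList 0 0 (by ring), lemB]
  ring
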